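-- pv_equiv track=rewrite | github.com/linux-netdev/ml-stat | stat-print.py | age_histogram_bucketize_uni
-- ===== SOURCE A (Python) =====
-- def age_histogram_bucketize_uni(months, histogram):
--     left = months
--     i = 12
--     while len(left):
--         months = left
--         left = []
--         histogram[i] = 0
--         for m in months:
--             if m < i:
--                 histogram[i] += 1
--             else:
--                 left.append(m)
--         if i < 24:
--             i *= 2
--         else:
--             i += 12
--     return histogram
-- ===== SOURCE B (Python) =====
-- def age_histogram_bucketize_uni(months, histogram):
--     # One pass: each month's bucket is computed directly (12 if m < 12 else
--     # 12 * (m // 12 + 1)); then every bucket 12, 24, ... up to the largest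
--     # needed one is written in order, zero-filled where empty.
--     if not months:
--         return histogram
--     buckets = [12 if m < 12 else 12 * (m // 12 + 1) for m in months]
--     counts = {}
--     for b in buckets:
--         counts[b] = counts.get(b, 0) + 1
--     top = max(buckets)
--     for j in range(12, top + 12, 12):
--         histogram[j] = counts.get(j, 0)
--     return histogram
-- ===== Notes on version B (the rewrite author's own statement) =====
-- stated objective: faster
-- what changed: Instead of repeatedly rescanning the remaining months for each growing bucket bound (A's while-loop over 12,24,36,... with an inner pass), B computes each month's bucket directly with the closed form 12 if m<12 else 12*(m//12+1), tallies them in one dictionary pass, and fills the buckets 12..max in one range loop.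
import Mathlib
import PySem

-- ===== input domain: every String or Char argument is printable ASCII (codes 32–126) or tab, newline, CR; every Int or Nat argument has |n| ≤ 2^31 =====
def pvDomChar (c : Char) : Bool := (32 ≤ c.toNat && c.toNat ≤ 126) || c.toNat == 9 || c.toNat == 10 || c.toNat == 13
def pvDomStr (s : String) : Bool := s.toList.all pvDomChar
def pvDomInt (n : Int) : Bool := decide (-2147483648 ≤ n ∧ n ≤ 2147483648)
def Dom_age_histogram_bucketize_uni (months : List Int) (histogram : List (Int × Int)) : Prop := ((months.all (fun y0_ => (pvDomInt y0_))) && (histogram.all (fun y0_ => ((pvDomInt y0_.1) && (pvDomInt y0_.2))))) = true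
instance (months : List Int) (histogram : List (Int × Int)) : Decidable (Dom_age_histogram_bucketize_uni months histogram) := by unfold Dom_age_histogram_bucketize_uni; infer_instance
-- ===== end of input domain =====

-- B replaces A's repeated rescans of the remaining months (one pass per bucket bound) by a
-- direct per-month bucket formula, one counting pass and one zero-filling range loop; both
-- A and B mutate the histogram dict in place in Python — the equivalence proved here is
-- about the returned mapping (the same object in both).

-- ===== PORT A =====
-- one step of A's inner 'for m in months' loop
def ageStep (i : Int) (s : PySem.Dict Int Int × List Int) (m : Int) :
    PySem.Dict Int Int × List Int :=
  if m < i then (s.1.insert i (s.1.getD i 0 + 1), s.2) else (s.1, s.2 ++ [m])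

-- characterisation of A's inner loop (stated up front because the termination argument
-- of the while-loop below needs the shape of the surviving list)
theorem ageFold_eq (i : Int) : ∀ (left : List Int) (e : PySem.Dict Int Int) (c : Int) (acc : List Int),
    left.foldl (ageStep i) (e.insert i c, acc)
    = (e.insert i (c + (left.countP (fun m => decide (m < i)) : Int)),
       acc ++ left.filter (fun m => !decide (m < i))) := by
  intro left
  induction left with
  | nil => intro e c acc; simp
  | cons m t ih =>
    intro e c acc
    by_cases hm : m < i
    · simp only [List.foldl_cons, ageStep, hm, PySem.Dict.getD_insert_self,
        PySem.Dict.insert_insert_self, List.countP_cons, List.filter_cons, decide_true,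
        Bool.not_true, if_true]
      rw [ih]
      simp
      ring_nf
    · simp only [List.foldl_cons, ageStep, List.countP_cons, List.filter_cons, hm,
        decide_false, Bool.not_false, if_false]
      rw [ih]
      simp

theorem pvFoldlMax_le (c : Int) : ∀ (t : List Int) (b : Int), b ≤ c → (∀ x ∈ t, x ≤ c) →
    t.foldl max b ≤ c := by
  intro t
  induction t with
  | nil => intro b hb _; simpa using hb
  | cons y t ih =>
    intro b hb h
    simp only [List.foldl_cons]
    exact ih _ (max_le hb (h y (by simp))) (fun x hx => h x (by simp [hx]))

-- A's while-loop; the proof argument 12 ≤ i only makes the loop total (in Python i starts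
-- at 12 and only grows), the computation is A's line for line.
def ageLoopA (left : List Int) (i : Int) (hi : 12 ≤ i) (hist : PySem.Dict Int Int) :
    PySem.Dict Int Int :=
  if hL : left = [] then hist
  else
    -- months = left; left = []; histogram[i] = 0; for m in months: …; then advance i
    ageLoopA (left.foldl (ageStep i) (hist.insert i 0, [])).2
      (if i < 24 then i * 2 else i + 12) (by split <;> omega)
      (left.foldl (ageStep i) (hist.insert i 0, [])).1
termination_by (if left = [] then 0 else ((left.foldl max (i - 12)) + 12 - i).toNat + 1)
decreasing_by
  simp only [List.foldl_attach, dite_eq_ite, ageFold_eq, List.nil_append]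
  rw [if_neg hL]
  by_cases h2 : left.filter (fun m => !decide (m < i)) = []
  · simp [h2]
  · rw [if_neg h2]
    obtain ⟨x, hxf⟩ := List.exists_mem_of_ne_nil _ h2
    have hxl : x ∈ left := List.mem_of_mem_filter hxf
    have hxi : i ≤ x := by
      have := List.of_mem_filter hxf; simpa using this
    have hM : x ≤ left.foldl max (i - 12) := (PySem.List.le_foldl_max left (i - 12)).2 x hxl
    set i' := if i < 24 then i * 2 else i + 12 with hi'
    have hstep : i + 12 ≤ i' := by rw [hi']; split <;> omega
    have hFle : (left.filter (fun m => !decide (m < i))).foldl max (i' - 12)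
        ≤ max (i' - 12) (left.foldl max (i - 12)) := by
      apply pvFoldlMax_le
      · exact le_max_left _ _
      · intro y hy
        exact le_trans ((PySem.List.le_foldl_max left (i - 12)).2 y (List.mem_of_mem_filter hy))
          (le_max_right _ _)
    have hFge : i' - 12 ≤ (left.filter (fun m => !decide (m < i))).foldl max (i' - 12) :=
      (PySem.List.le_foldl_max _ _).1
    have hMge : i ≤ left.foldl max (i - 12) := le_trans hxi hM
    rcases le_total (i' - 12) (left.foldl max (i - 12)) with hc | hc <;>
      simp only [max_eq_right hc, max_eq_left hc] at hFle <;> omega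

def age_histogram_bucketize_uni (months : List Int) (histogram : List (Int × Int)) :
    List (Int × Int) :=
  (ageLoopA months 12 (by norm_num) (PySem.Dict.ofList histogram)).items

-- ===== PORT B =====
-- bucket of one month: 12 if m < 12 else 12 * (m // 12 + 1)
def pvBucket (m : Int) : Int := if m < 12 then 12 else 12 * (PySem.Int.floordiv m 12 + 1)

def age_histogram_bucketize_uni_alt (months : List Int) (histogram : List (Int × Int)) :
    List (Int × Int) :=
  let d := PySem.Dict.ofList histogram
  if months = [] then d.items
  else
    let buckets := months.map pvBucket
    let counts := buckets.foldl (fun c b => c.insert b (c.getD b 0 + 1)) PySem.Dict.empty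
    match PySem.List.max? buckets (fun y => y) with
    | none => d.items  -- unreachable: buckets is nonempty
    | some top =>
      ((PySem.List.pyRange 12 (top + 12) 12).foldl
          (fun h j => h.insert j (counts.getD j 0)) d).items

-- ===== PRECONDITION & SPEC =====
def Spec_age_histogram_bucketize_uni (months : List Int) (histogram : List (Int × Int)) (out : List (Int × Int)) : Prop := out = age_histogram_bucketize_uni_alt months histogram
instance (months : List Int) (histogram : List (Int × Int)) (out : List (Int × Int)) : Decidable (Spec_age_histogram_bucketize_uni months histogram out) := by unfold Spec_age_histogram_bucketize_uni; infer_instance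

-- ===== CLAIM (what is proved, stated in full; the proofs are below) =====
def Claim_equal_age_histogram_bucketize_uni : Prop := ∀ (months : List Int) (histogram : List (Int × Int)), Dom_age_histogram_bucketize_uni months histogram → Spec_age_histogram_bucketize_uni months histogram (age_histogram_bucketize_uni months histogram)

-- ===== LEMMAS AND PROOFS =====

-- max of a nonempty list, as B's max? computes it
def pvMax (l : List Int) : Int := match l with | [] => 0 | x :: t => t.foldl max x

theorem pvMax_max? (x : Int) (t : List Int) :
    PySem.List.max? (x :: t) (fun y => y) = some (pvMax (x :: t)) :=
  PySem.List.max?_id_cons x t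

theorem le_pvMax (l : List Int) (x : Int) (hx : x ∈ l) : x ≤ pvMax l := by
  cases l with
  | nil => cases hx
  | cons y t =>
    rcases List.mem_cons.mp hx with rfl | h
    · exact (PySem.List.le_foldl_max t x).1
    · exact (PySem.List.le_foldl_max t y).2 x h

theorem pvFoldlMax_mem (t : List Int) : ∀ (b : Int), t.foldl max b = b ∨ t.foldl max b ∈ t := by
  induction t with
  | nil => intro b; left; rfl
  | cons z t ih =>
    intro b
    simp only [List.foldl_cons]
    rcases ih (max b z) with h | h
    · rcases max_choice b z with hm | hm
      · left; rw [h, hm]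
      · right; rw [h, hm]; exact List.mem_cons_self
    · right; exact List.mem_cons_of_mem _ h

theorem pvMax_mem (l : List Int) (hl : l ≠ []) : pvMax l ∈ l := by
  cases l with
  | nil => exact absurd rfl hl
  | cons y t =>
    rcases pvFoldlMax_mem t y with h | h
    · simp only [pvMax, h]; exact List.mem_cons_self
    · exact List.mem_cons_of_mem _ h

theorem pvBucket_gt (m : Int) : m < pvBucket m := by
  simp only [pvBucket, PySem.Int.floordiv, Int.fdiv_eq_ediv]
  split <;> omega

theorem pvBucket_ge (m : Int) : 12 ≤ pvBucket m := by
  simp only [pvBucket, PySem.Int.floordiv, Int.fdiv_eq_ediv]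
  split <;> omega

theorem pvBucket_dvd (m : Int) : (12 : Int) ∣ pvBucket m := by
  simp only [pvBucket, PySem.Int.floordiv, Int.fdiv_eq_ediv]
  split
  · exact dvd_refl 12
  · exact ⟨_, rfl⟩

theorem pvBucket_eq_iff (m i : Int) (hi : 12 ≤ i) (hdvd : (12 : Int) ∣ i)
    (hinv : i ≤ pvBucket m) : (m < i) ↔ pvBucket m = i := by
  obtain ⟨k, rfl⟩ := hdvd
  constructor
  · intro hm
    have hle : pvBucket m ≤ 12 * k := by
      simp only [pvBucket, PySem.Int.floordiv, Int.fdiv_eq_ediv]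
      split <;> omega
    omega
  · intro he
    have := pvBucket_gt m
    omega

-- step 12 range: induction forms
theorem pyRange12_nil (a b : Int) (h : b ≤ a) : PySem.List.pyRange a b 12 = [] := by
  rw [PySem.List.pyRange_of_pos a b (by norm_num)]
  simp [show ¬ a < b by omega]

theorem pyRange12_cons (a b : Int) (h : a < b) :
    PySem.List.pyRange a b 12 = a :: PySem.List.pyRange (a + 12) b 12 := by
  rw [PySem.List.pyRange_of_pos a b (by norm_num), PySem.List.pyRange_of_pos (a + 12) b (by norm_num)]
  have hN : (if a < b then ((b - a + 12 - 1) / 12).toNat else 0)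
      = (if a + 12 < b then ((b - (a + 12) + 12 - 1) / 12).toNat else 0) + 1 := by
    split <;> split <;> omega
  rw [hN, List.range_succ_eq_map]
  simp only [List.map_cons, List.map_map]
  congr 1
  · push_cast; ring
  · apply List.map_congr_left
    intro k _
    simp only [Function.comp_apply]
    push_cast
    ring

-- the while-loop of A computes exactly B's "fill buckets i, i+12, … with their counts"
theorem ageLoopA_eq (left : List Int) (i : Int) (hi : 12 ≤ i) (hist : PySem.Dict Int Int) :
    (12 : Int) ∣ i → (∀ m ∈ left, i ≤ pvBucket m) →
    ageLoopA left i hi hist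
      = (PySem.List.pyRange i (pvMax (left.map pvBucket) + 12) 12).foldl
          (fun h j => h.insert j (((left.map pvBucket).count j : Int))) hist := by
  induction left, i, hi, hist using ageLoopA.induct with
  | case1 i hi hist =>
    intro _ _
    rw [ageLoopA.eq_def, dif_pos rfl]
    simp only [List.map_nil]
    rw [pyRange12_nil _ _ (by simp only [pvMax]; omega)]
    simp
  | case2 left i hi hist hL ih =>
    intro hdvd hinv
    rw [ageLoopA.eq_def, dif_neg hL]
    simp only [List.foldl_attach, dite_eq_ite, ageFold_eq, List.nil_append] at ih ⊢
    have hstep : (if i < 24 then i * 2 else i + 12) = i + 12 := by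
      obtain ⟨k, rfl⟩ := hdvd
      split <;> omega
    simp only [hstep] at ih ⊢
    have hdvd' : (12 : Int) ∣ (i + 12) := by
      obtain ⟨k, rfl⟩ := hdvd; exact ⟨k + 1, by ring⟩
    have hcnt : ((left.map pvBucket).count i : Int)
        = (left.countP (fun m => decide (m < i)) : Int) := by
      rw [List.count_eq_countP, List.countP_map]
      congr 1
      apply List.countP_congr
      intro m hm
      simp only [Function.comp_apply, beq_iff_eq, decide_eq_true_eq]
      exact (pvBucket_eq_iff m i hi hdvd (hinv m hm)).symm
    set L2 := left.filter (fun m => !decide (m < i)) with hL2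
    have hinv2 : ∀ m ∈ L2, i + 12 ≤ pvBucket m := by
      intro m hm
      have h1 : ¬ m < i := by have := List.of_mem_filter hm; simpa using this
      have h2 : i ≤ pvBucket m := hinv m (List.mem_of_mem_filter hm)
      have h3 : pvBucket m ≠ i := fun he => h1 ((pvBucket_eq_iff m i hi hdvd h2).mpr he)
      obtain ⟨k, hk⟩ := hdvd
      obtain ⟨k', hk'⟩ := pvBucket_dvd m
      omega
    rw [ih hdvd' hinv2]
    by_cases h2 : L2 = []
    · -- everything fell in bucket i: the surviving list is empty, one bucket is written
      have hall : ∀ m ∈ left, pvBucket m = i := by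
        intro m hm
        have hmi : m < i := by
          by_contra hc
          exact (List.ne_nil_of_mem (List.mem_filter.mpr ⟨hm, by simpa using hc⟩)) h2
        exact (pvBucket_eq_iff m i hi hdvd (hinv m hm)).mp hmi
      have hTm : pvMax (left.map pvBucket) = i := by
        have hne : left.map pvBucket ≠ [] := by simpa using hL
        obtain ⟨m, hm, he⟩ := List.mem_map.mp (pvMax_mem _ hne)
        rw [← he, hall m hm]
      rw [h2, hTm]
      simp only [List.map_nil]
      rw [pyRange12_nil (i + 12) (pvMax ([] : List Int) + 12) (by simp only [pvMax]; omega),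
        pyRange12_cons i (i + 12) (by omega), pyRange12_nil (i + 12) (i + 12) le_rfl]
      simp only [List.foldl_cons, List.foldl_nil]
      rw [hcnt]
      norm_num
    · -- some months survive: the target range splits off its head bucket i
      have hT2 : pvMax (L2.map pvBucket) = pvMax (left.map pvBucket) := by
        have hne2 : L2.map pvBucket ≠ [] := by simpa using h2
        have hne : left.map pvBucket ≠ [] := by simpa using hL
        apply le_antisymm
        · obtain ⟨m, hm, he⟩ := List.mem_map.mp (pvMax_mem _ hne2)
          rw [← he]
          exact le_pvMax _ _ (List.mem_map.mpr ⟨m, List.mem_of_mem_filter hm, rfl⟩)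
        · obtain ⟨m, hm, he⟩ := List.mem_map.mp (pvMax_mem _ hne)
          by_cases hmi : m < i
          · -- left's max bucket would be i, yet a survivor's bucket is ≥ i + 12 — use it
            obtain ⟨x, hx⟩ := List.exists_mem_of_ne_nil _ h2
            have hx12 := hinv2 x hx
            have hxle : pvBucket x ≤ pvMax (L2.map pvBucket) :=
              le_pvMax _ _ (List.mem_map.mpr ⟨x, hx, rfl⟩)
            have hmax : pvMax (left.map pvBucket) = i := by
              rw [← he]
              exact (pvBucket_eq_iff m i hi hdvd (hinv m hm)).mp hmi
            omega
          · have hmL2 : m ∈ L2 := List.mem_filter.mpr ⟨hm, by simpa using hmi⟩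
            rw [← he]
            exact le_pvMax _ _ (List.mem_map.mpr ⟨m, hmL2, rfl⟩)
      have hT12 : i < pvMax (left.map pvBucket) + 12 := by
        obtain ⟨x, hx⟩ := List.exists_mem_of_ne_nil _ h2
        have h1 := hinv2 x hx
        have h2' : pvBucket x ≤ pvMax (left.map pvBucket) :=
          le_pvMax _ _ (List.mem_map.mpr ⟨x, List.mem_of_mem_filter hx, rfl⟩)
        omega
      rw [hT2, pyRange12_cons i (pvMax (left.map pvBucket) + 12) hT12]
      simp only [List.foldl_cons]
      rw [hcnt]
      norm_num
      apply PySem.List.foldl_congr_mem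
      intro acc j hj
      have hji : i + 12 ≤ j := ((PySem.List.mem_pyRange_iff_of_pos (by norm_num) j).mp hj).1
      have hcj : (L2.map pvBucket).count j = (left.map pvBucket).count j := by
        rw [List.count_eq_countP, List.count_eq_countP, List.countP_map, List.countP_map,
          hL2, List.countP_filter]
        apply List.countP_congr
        intro m hm
        simp only [Function.comp_apply, Bool.and_eq_true, beq_iff_eq,
          Bool.not_eq_true', decide_eq_false_iff_not]
        constructor
        · rintro ⟨hb, _⟩; exact hb
        · intro hb
          refine ⟨hb, fun hc => ?_⟩
          have := (pvBucket_eq_iff m i hi hdvd (hinv m hm)).mp hc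
          omega
      rw [hcj]

-- B on a nonempty list, in the same canonical form
theorem alt_cons (x : Int) (t : List Int) (histogram : List (Int × Int)) :
    age_histogram_bucketize_uni_alt (x :: t) histogram
      = ((PySem.List.pyRange 12 (pvMax ((x :: t).map pvBucket) + 12) 12).foldl
          (fun h j => h.insert j ((((x :: t).map pvBucket).count j : Int)))
          (PySem.Dict.ofList histogram)).items := by
  simp only [age_histogram_bucketize_uni_alt, reduceCtorEq, if_false, List.map_cons,
    pvMax_max?]
  congr 1
  apply PySem.List.foldl_congr_mem
  intro acc j _
  congr 1
  rw [PySem.Dict.getD_foldl_insert_add_one, PySem.Dict.getD_empty]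
  simp

-- ===== VERDICT (by name: the statement is the Claim_ definition above) =====
theorem age_histogram_bucketize_uni_spec : Claim_equal_age_histogram_bucketize_uni := by
  unfold Claim_equal_age_histogram_bucketize_uni Spec_age_histogram_bucketize_uni
  intro months histogram _
  cases months with
  | nil =>
    unfold age_histogram_bucketize_uni age_histogram_bucketize_uni_alt
    rw [ageLoopA.eq_def]
    simp
  | cons x t =>
    rw [alt_cons]
    unfold age_histogram_bucketize_uni
    rw [ageLoopA_eq (x :: t) 12 (by norm_num) (PySem.Dict.ofList histogram)
      ⟨1, by norm_num⟩ (fun m _ => pvBucket_ge m)]
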